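-- pv_equiv track=rewrite | github.com/cursork/cvttpd2dq-rosetta | patch.py | find_code_caves
-- ===== SOURCE A (Python) =====
-- def find_code_caves(data, min_size=64):
--     """Find padding areas (NOP/INT3 sequences) that can hold trampolines."""
--     caves = []
--     i = 0
--     while i < len(data):
--         if data[i] in (0x90, 0xCC):  # NOP or INT3
--             start = i
--             fill = data[i]
--             while i < len(data) and data[i] == fill:
--                 i += 1
--             if i - start >= min_size:
--                 caves.append({'offset': start, 'size': i - start})
--         else:
--             i += 1
--     return caves
-- ===== SOURCE B (Python) =====
-- def _rle(data):
--     """Run-length encode: list of (value, run_length) for each maximal run."""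
--     runs = []
--     i = 0
--     n = len(data)
--     while i < n:
--         run = 1
--         while i + run < n and data[i + run] == data[i]:
--             run += 1
--         runs.append((data[i], run))
--         i += run
--     return runs
--
--
-- def find_code_caves(data, min_size=64):
--     """Find padding areas (NOP/INT3 sequences) that can hold trampolines."""
--     caves = []
--     offset = 0
--     for value, run in _rle(data):
--         if value in (0x90, 0xCC) and run >= min_size:
--             caves.append({'offset': offset, 'size': run})
--         offset += run
--     return caves
-- ===== Notes on version B (the rewrite author's own statement) =====
-- stated objective: alternative
-- what changed: B first run-length encodes the whole input into (value, run) groups, then a single scan over the groups with a running offset selects the 0x90/0xCC runs of sufficient size, instead of A's interleaved index-walking state machine that only groups fill bytes.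
import Mathlib
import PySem

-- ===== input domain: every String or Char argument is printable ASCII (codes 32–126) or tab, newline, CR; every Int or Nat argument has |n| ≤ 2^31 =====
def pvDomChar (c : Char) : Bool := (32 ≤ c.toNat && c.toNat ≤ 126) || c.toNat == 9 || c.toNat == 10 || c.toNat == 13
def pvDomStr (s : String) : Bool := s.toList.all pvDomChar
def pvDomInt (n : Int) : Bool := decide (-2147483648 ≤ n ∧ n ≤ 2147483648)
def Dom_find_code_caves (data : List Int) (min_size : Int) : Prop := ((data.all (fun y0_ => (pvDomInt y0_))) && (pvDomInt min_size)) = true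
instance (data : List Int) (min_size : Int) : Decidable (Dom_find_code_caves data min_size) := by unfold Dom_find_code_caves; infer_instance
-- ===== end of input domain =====

-- B run-length encodes the input once, then one scan over the (value, run) groups with a
-- running offset selects the 0x90/0xCC runs; same O(n) cost, different decomposition.

-- ===== PORT A =====
-- inner while loop of A: consume the bytes equal to `fill`, returning (count, remaining suffix)
def pvConsume (fill : Int) : List Int → Nat × List Int
  | [] => (0, [])
  | y :: ys =>
    if y = fill then
      let p := pvConsume fill ys
      (p.1 + 1, p.2)
    else (0, y :: ys)

theorem pvConsume_len (fill : Int) (l : List Int) : (pvConsume fill l).2.length ≤ l.length := by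
  induction l with
  | nil => simp [pvConsume]
  | cons y ys ih =>
    simp only [pvConsume]
    split
    · exact le_trans ih (by simp)
    · simp

-- A's outer while loop; `i` is the current index, the list argument is data[i:]
def pvLoopA (m : Int) : List Int → Int → List (List (String × Int))
  | [], _ => []
  | x :: rest, i =>
    if x = 144 ∨ x = 204 then
      -- inner while: data[i] = fill holds at entry, so it consumes the head and the following equal bytes
      let p := pvConsume x rest
      let size : Int := (p.1 : Int) + 1
      (if size ≥ m then [[("offset", i), ("size", size)]] else []) ++ pvLoopA m p.2 (i + size)
    else
      pvLoopA m rest (i + 1)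
termination_by l _ => l.length
decreasing_by
  · exact Nat.lt_succ_of_le (pvConsume_len x rest)
  · simp

def find_code_caves (data : List Int) (min_size : Int) : List (List (String × Int)) :=
  pvLoopA min_size data 0

-- ===== PORT B =====
-- _rle: run-length encoding; the inner while (extend the run while the next byte matches)
-- is rendered as takeWhile/dropWhile on the suffix after the head
def pvRle : List Int → List (Int × Int)
  | [] => []
  | x :: rest =>
    (x, ((rest.takeWhile (fun y => y == x)).length : Int) + 1) ::
      pvRle (rest.dropWhile (fun y => y == x))
termination_by l => l.length
decreasing_by
  exact Nat.lt_succ_of_le (List.length_dropWhile_le _ _)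

-- one step of B's for loop over the runs: state = (caves, offset)
def pvStep (m : Int) (acc : List (List (String × Int)) × Int) (pr : Int × Int) :
    List (List (String × Int)) × Int :=
  ((if (pr.1 = 144 ∨ pr.1 = 204) ∧ pr.2 ≥ m then
      acc.1 ++ [[("offset", acc.2), ("size", pr.2)]]
    else acc.1), acc.2 + pr.2)

def find_code_caves_alt (data : List Int) (min_size : Int) : List (List (String × Int)) :=
  ((pvRle data).foldl (pvStep min_size) ([], 0)).1

-- ===== PRECONDITION & SPEC =====
def Spec_find_code_caves (data : List Int) (min_size : Int) (out : List (List (String × Int))) : Prop := out = find_code_caves_alt data min_size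
instance (data : List Int) (min_size : Int) (out : List (List (String × Int))) : Decidable (Spec_find_code_caves data min_size out) := by unfold Spec_find_code_caves; infer_instance

-- ===== CLAIM (what is proved, stated in full; the proofs are below) =====
def Claim_equal_find_code_caves : Prop := ∀ (data : List Int) (min_size : Int), Dom_find_code_caves data min_size → Spec_find_code_caves data min_size (find_code_caves data min_size)

-- ===== LEMMAS AND PROOFS =====

-- A's inner while is exactly takeWhile/dropWhile
theorem pvConsume_eq (fill : Int) (l : List Int) :
    pvConsume fill l =
      ((l.takeWhile (fun y => y == fill)).length, l.dropWhile (fun y => y == fill)) := by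
  induction l with
  | nil => simp [pvConsume]
  | cons y ys ih =>
    by_cases h : y = fill
    · have hb : (y == fill) = true := by simp [h]
      simp [pvConsume, h, ih, List.takeWhile, List.dropWhile]
    · have hb : (y == fill) = false := by simp [h]
      simp [pvConsume, h, List.takeWhile, List.dropWhile, hb]

-- folding pvStep: the caves accumulator factors out
theorem pvFoldl_fst (m : Int) (rs : List (Int × Int)) (c : List (List (String × Int))) (off : Int) :
    (rs.foldl (pvStep m) (c, off)).1 = c ++ (rs.foldl (pvStep m) ([], off)).1 := by
  induction rs generalizing c off with
  | nil => simp
  | cons p rs ih =>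
    simp only [List.foldl_cons, pvStep]
    by_cases h : (p.1 = 144 ∨ p.1 = 204) ∧ p.2 ≥ m
    · simp only [if_pos h]
      rw [ih, ih (c := [] ++ [[("offset", off), ("size", p.2)]])]
      simp
    · simp only [if_neg h]
      rw [ih, ih (c := ([] : List (List (String × Int))))]

-- skipping a block of non-fill bytes just advances the index
theorem pvLoopA_skip (m : Int) (t r : List Int) (i : Int)
    (h : ∀ y ∈ t, ¬(y = 144 ∨ y = 204)) :
    pvLoopA m (t ++ r) i = pvLoopA m r (i + t.length) := by
  induction t generalizing i with
  | nil => simp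
  | cons y ts ih =>
    have hy := h y (by simp)
    simp only [List.cons_append, pvLoopA, if_neg hy]
    rw [ih (i + 1) (fun z hz => h z (List.mem_cons_of_mem _ hz))]
    have hlen : (((y :: ts).length : Nat) : Int) = (ts.length : Int) + 1 := by
      simp
    rw [hlen]
    congr 1
    omega

-- main invariant: A's loop at index i equals B's fold over the runs of the suffix, offset i
theorem pvLoop_eq (m : Int) (n : Nat) :
    ∀ l : List Int, l.length ≤ n → ∀ i : Int,
      pvLoopA m l i = (List.foldl (pvStep m) ([], i) (pvRle l)).1 := by
  induction n with
  | zero =>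
    intro l hl i
    have hnil : l = [] := List.length_eq_zero_iff.mp (Nat.le_zero.mp hl)
    simp [hnil, pvLoopA, pvRle]
  | succ n ih =>
    intro l hl i
    cases l with
    | nil => simp [pvLoopA, pvRle]
    | cons x rest =>
      simp only [List.length_cons, Nat.succ_le_succ_iff] at hl
      have hr : (rest.dropWhile (fun y => y == x)).length ≤ n :=
        le_trans (List.length_dropWhile_le _ _) hl
      have hrle : pvRle (x :: rest) =
          (x, ((rest.takeWhile (fun y => y == x)).length : Int) + 1) ::
            pvRle (rest.dropWhile (fun y => y == x)) := by
        simp [pvRle]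
      by_cases hx : x = 144 ∨ x = 204
      · simp only [pvLoopA, if_pos hx, pvConsume_eq]
        rw [hrle, List.foldl_cons]
        simp only [pvStep]
        by_cases hm : ((rest.takeWhile (fun y => y == x)).length : Int) + 1 ≥ m
        · simp only [if_pos hm, if_pos (And.intro hx hm)]
          rw [pvFoldl_fst, ← ih _ hr]
          simp
        · simp only [if_neg hm, if_neg (fun hc => hm (And.right hc))]
          rw [← ih _ hr]
          simp
      · simp only [pvLoopA, if_neg hx]
        have hmem : ∀ y ∈ rest.takeWhile (fun y => y == x), ¬(y = 144 ∨ y = 204) := by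
          intro y hy
          have hyx : y = x := by simpa using List.mem_takeWhile_imp hy
          rw [hyx]; exact hx
        have lhs : pvLoopA m rest (i + 1) =
            pvLoopA m (rest.dropWhile (fun y => y == x))
              (i + 1 + ((rest.takeWhile (fun y => y == x)).length : Int)) := by
          conv_lhs => rw [← List.takeWhile_append_dropWhile (p := fun y => y == x) (l := rest)]
          exact pvLoopA_skip m _ _ _ hmem
        rw [lhs, ih _ hr]
        rw [hrle, List.foldl_cons]
        simp only [pvStep]
        rw [if_neg (fun hc => hx (And.left hc))]
        have hoff : i + 1 + ((rest.takeWhile (fun y => y == x)).length : Int)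
            = i + (((rest.takeWhile (fun y => y == x)).length : Int) + 1) := by ring
        rw [hoff]

-- ===== VERDICT (by name: the statement is the Claim_ definition above) =====
theorem find_code_caves_spec : Claim_equal_find_code_caves := by
  intro data min_size _
  unfold Spec_find_code_caves find_code_caves find_code_caves_alt
  exact pvLoop_eq min_size data.length data (le_refl _) 0
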